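-- pv_equiv track=rewrite | github.com/vansavagee/misis_sistanilyze | task2/task.py | calculate_relationships
-- ===== SOURCE A (Python) =====
-- from collections import defaultdict, deque
--
-- def calculate_relationships(edges, node_count):
--     adjacency_list = defaultdict(list)
--     reverse_adjacency_list = defaultdict(list)
--     for parent, child in edges:
--         adjacency_list[parent].append(child)
--         reverse_adjacency_list[child].append(parent)
--
--     l_values = [[0] * 5 for _ in range(node_count)]
--
--     for parent, children in adjacency_list.items():
--         for child in children:
--             l_values[parent - 1][0] += 1
--             l_values[child - 1][1] += 1
--
--     for node in range(1, node_count + 1):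
--         visited = set()
--         queue = deque([(node, 0)])
--         while queue:
--             current, depth = queue.popleft()
--             if current in visited:
--                 continue
--             visited.add(current)
--             if depth > 1:
--                 l_values[node - 1][2] += 1
--                 l_values[current - 1][3] += 1
--             for neighbor in adjacency_list[current]:
--                 if neighbor not in visited:
--                     queue.append((neighbor, depth + 1))
--
--     for node in range(1, node_count + 1):
--         parents = reverse_adjacency_list[node]
--         siblings = set()
--         for parent in parents:
--             siblings.update(adjacency_list[parent])
--         siblings.discard(node)
--         l_values[node - 1][4] = len(siblings)
--
--     return l_values
-- ===== SOURCE B (Python) =====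
-- def calculate_relationships(edges, node_count):
--     # Same per-node stats as A, but with NO graph traversal at all: all-pairs
--     # reachability is computed globally by fixpoint iteration of R := E u E.R
--     # (len(edges) rounds suffice: a shortest path never repeats a source node,
--     # so it uses at most len(edges) edges); the distance->=2 descendants of s
--     # are then reach[s] minus {s} minus s's direct children.  Degrees are
--     # counted in one direct pass over the edges, and the sibling count is
--     # |union of co-children| - 1 instead of a built-then-discarded set.
--     children = {}
--     parents = {}
--     rows = [[0] * 5 for _ in range(node_count)]
--     for p, c in edges:
--         children.setdefault(p, []).append(c)
--         parents.setdefault(c, []).append(p)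
--         rows[p - 1][0] += 1
--         rows[c - 1][1] += 1
--
--     reach = {p: set(cs) for p, cs in children.items()}
--     for _ in range(len(edges)):
--         reach = {p: set(cs).union(*(reach.get(c, set()) for c in cs))
--                  for p, cs in children.items()}
--
--     for s in range(1, node_count + 1):
--         direct = set(children.get(s, []))
--         for d in reach.get(s, set()):
--             if d != s and d not in direct:
--                 rows[s - 1][2] += 1
--                 rows[d - 1][3] += 1
--
--     for node in range(1, node_count + 1):
--         ps = parents.get(node, [])
--         u = {c for p in ps for c in children.get(p, [])}
--         rows[node - 1][4] = len(u) - 1 if ps else 0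
--     return rows
-- ===== Notes on version B (the rewrite author's own statement) =====
-- stated objective: alternative
-- what changed: The n per-source depth-annotated BFS traversals are removed entirely: all-pairs reachability is computed once globally by fixpoint iteration of R := E ∪ E∘R (len(edges) rounds, since a shortest path never repeats a source node), and each node's distance-≥2 descendants are read off as reach[s] minus {s} minus its direct children; degrees are counted in one direct pass over the edges and the sibling count is |union of co-children| - 1 instead of a built-then-discarded set.
import Mathlib
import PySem

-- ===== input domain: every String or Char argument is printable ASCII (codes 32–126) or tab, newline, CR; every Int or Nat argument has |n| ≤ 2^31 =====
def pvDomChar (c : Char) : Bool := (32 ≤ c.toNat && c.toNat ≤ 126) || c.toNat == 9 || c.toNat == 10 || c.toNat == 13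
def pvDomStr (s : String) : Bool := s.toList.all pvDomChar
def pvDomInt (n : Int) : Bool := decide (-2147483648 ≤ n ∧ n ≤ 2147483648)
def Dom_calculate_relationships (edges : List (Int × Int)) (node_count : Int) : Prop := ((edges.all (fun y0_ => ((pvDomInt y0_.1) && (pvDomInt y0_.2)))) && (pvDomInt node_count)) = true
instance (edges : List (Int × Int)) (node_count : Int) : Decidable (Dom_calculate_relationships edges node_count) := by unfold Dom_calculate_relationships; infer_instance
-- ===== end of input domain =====

-- B removes the n per-source depth-annotated BFS traversals entirely: all-pairs
-- reachability is computed once globally by fixpoint iteration of R := E ∪ E∘R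
-- (len(edges) rounds), and each node's distance-≥2 descendants are read off as
-- reach[s] minus {s} minus its direct children; degrees are counted in one direct
-- pass over the edges and the sibling count is |union of co-children| − 1;
-- objective: alternative decomposition (same per-node stats, no traversal).

-- ===== PORT A =====

-- Python's list index: nonnegative as is, negative counted from the end
-- (exact whenever -len(l) ≤ i-1 < len(l), which Pre_ guarantees at every use)
def pvIdx (len : Nat) (i : Int) : Nat :=
  if 0 ≤ i then i.toNat else ((len : Int) + i).toNat

-- l[i-1][j] += 1  with Python's wraparound rule
def pvBump (l : List (List Int)) (i : Int) (j : Nat) : List (List Int) :=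
  l.modify (pvIdx l.length (i - 1)) (fun row => row.modify j (· + 1))

-- A's first loop builds two independent defaultdict(list)s; ported as the two
-- independent folds of the same loop (adjacency_list / reverse_adjacency_list).
def pvAdj (edges : List (Int × Int)) : PySem.Dict Int (List Int) :=
  edges.foldl (fun d e => d.modify e.1 [] (· ++ [e.2])) PySem.Dict.empty

def pvRadj (edges : List (Int × Int)) : PySem.Dict Int (List Int) :=
  edges.foldl (fun d e => d.modify e.2 [] (· ++ [e.1])) PySem.Dict.empty

lemma pvAdj_getD (edges : List (Int × Int)) (p : Int) :
    (pvAdj edges).getD p [] = (edges.filter (fun e => e.1 == p)).map (·.2) := by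
  simpa [pvAdj] using PySem.Dict.getD_foldl_modify_append edges PySem.Dict.empty p

-- cited by the ports' termination/typing obligations
lemma pvAdj_child_mem (edges : List (Int × Int)) (p y : Int)
    (h : y ∈ (pvAdj edges).getD p []) : y ∈ edges.map Prod.snd := by
  rw [pvAdj_getD] at h
  rcases List.mem_map.1 h with ⟨e, he, rfl⟩
  exact List.mem_map_of_mem (List.mem_of_mem_filter he)

lemma pv_filter_length_le {α : Type} (p q : α → Bool) (l : List α)
    (h : ∀ a, p a = true → q a = true) : (l.filter p).length ≤ (l.filter q).length := by
  induction l with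
  | nil => simp
  | cons a t ih =>
    have ha := h a
    cases hp : p a <;> cases hq : q a <;> simp_all [List.filter_cons] <;> omega

lemma pv_filter_length_lt {α : Type} (p q : α → Bool) (l : List α)
    (h : ∀ a, p a = true → q a = true) (x : α) (hx : x ∈ l)
    (hqx : q x = true) (hpx : p x = false) :
    (l.filter p).length < (l.filter q).length := by
  induction l with
  | nil => cases hx
  | cons a t ih =>
    rcases List.mem_cons.1 hx with rfl | hxt
    · have hle := pv_filter_length_le p q t h
      simp only [List.filter_cons, hpx, hqx]
      simp only [Bool.false_eq_true, if_false, if_true, List.length_cons]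
      omega
    · have hlt := ih hxt
      have ha := h a
      cases hp : p a <;> cases hq : q a <;> simp_all [List.filter_cons] <;> omega

-- strict decrease of the termination measure when a fresh node is visited
lemma pv_measure_lt (allv : List Int) (V : PySem.Set Int) (x : Int)
    (hx : x ∈ allv) (hnx : ¬ V.contains x = true) :
    (allv.filter (fun v => !(PySem.Set.add V x).contains v)).length <
      (allv.filter (fun v => !V.contains v)).length := by
  have hxV : x ∉ V := fun hm => hnx ((PySem.Set.contains_iff V x).mpr hm)
  refine pv_filter_length_lt _ _ _ ?_ x hx (by simp [hnx, hxV]) ?_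
  · intro a ha
    simp only [Bool.not_eq_true'] at ha ⊢
    by_contra hc
    rw [Bool.not_eq_false] at hc
    have hmem : (PySem.Set.add V x).contains a = true :=
      (PySem.Set.contains_iff _ a).mpr ((PySem.Set.mem_add V x a).mpr
        (Or.inl ((PySem.Set.contains_iff V a).mp hc)))
    rw [ha] at hmem
    cases hmem
  · have hcx : (PySem.Set.add V x).contains x = true :=
      (PySem.Set.contains_iff _ x).mpr ((PySem.Set.mem_add V x x).mpr (Or.inr rfl))
    simp [hcx]

-- transliteration of A's inner while-loop (deque of (node, depth) pairs); the
-- allv/hadj/hQ arguments only justify termination, they do not alter the computation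
def bfsA (adj : PySem.Dict Int (List Int)) (allv : List Int)
    (hadj : ∀ p y, y ∈ adj.getD p [] → y ∈ allv) (s : Int)
    (Q : List (Int × Int)) (V : PySem.Set Int) (l : List (List Int))
    (hQ : ∀ e ∈ Q, e.1 ∈ allv) : List (List Int) :=
  match Q with
  | [] => l
  | (x, d) :: rest =>
    if hx : V.contains x then
      bfsA adj allv hadj s rest V l (fun e he => hQ e (List.mem_cons_of_mem _ he))
    else
      bfsA adj allv hadj s
        (rest ++ ((adj.getD x []).filter (fun y => !(PySem.Set.add V x).contains y)).map (fun y => (y, d + 1)))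
        (PySem.Set.add V x)
        (if d > 1 then pvBump (pvBump l s 2) x 3 else l)
        (by
          intro e he
          rcases List.mem_append.1 he with h | h
          · exact hQ e (List.mem_cons_of_mem _ h)
          · rcases List.mem_map.1 h with ⟨y, hy, rfl⟩
            exact hadj x y (List.mem_of_mem_filter hy))
  termination_by ((allv.filter (fun v => !V.contains v)).length, Q.length)
  decreasing_by
  · exact Prod.Lex.right _ (Nat.lt_succ_self _)
  · exact Prod.Lex.left _ _ (pv_measure_lt allv V x (hQ (x, d) (List.mem_cons_self)) hx)

def calculate_relationships (edges : List (Int × Int)) (node_count : Int) : List (List Int) :=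
  let adjacency := pvAdj edges
  let radjacency := pvRadj edges
  let l0 : List (List Int) := List.replicate node_count.toNat (List.replicate 5 0)
  -- for parent, children in adjacency_list.items(): for child in children: …
  let l1 := adjacency.items.foldl
      (fun l pc => pc.2.foldl (fun l c => pvBump (pvBump l pc.1 0) c 1) l) l0
  -- depth-annotated BFS from every node  (adjacency_list[current] reads ported as
  -- getD: the defaultdict's insertion of empty values never changes any result)
  let l2 := (PySem.List.pyRange 1 (node_count + 1)).foldl
      (fun l node =>
        bfsA adjacency (node :: edges.map Prod.snd)
          (fun p y hy => List.mem_cons_of_mem _ (pvAdj_child_mem edges p y hy)) node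
          [(node, 0)] PySem.Set.empty l
          (by intro e he; rw [List.mem_singleton] at he; subst he; exact List.mem_cons_self)) l1
  -- siblings
  (PySem.List.pyRange 1 (node_count + 1)).foldl
      (fun l node =>
        let parents := radjacency.getD node []
        let siblings := parents.foldl (fun S p => PySem.Set.update S (adjacency.getD p [])) PySem.Set.empty
        let siblings2 := PySem.Set.discard siblings node
        l.modify (node - 1).toNat (fun row => row.set 4 (siblings2.length : Int))) l2

-- ===== PORT B =====

-- B's single edge pass: children dict, parents dict and the degree columns
def pvScan (edges : List (Int × Int)) (rows0 : List (List Int)) :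
    PySem.Dict Int (List Int) × PySem.Dict Int (List Int) × List (List Int) :=
  edges.foldl
    (fun st e =>
      (st.1.modify e.1 [] (· ++ [e.2]), st.2.1.modify e.2 [] (· ++ [e.1]),
        pvBump (pvBump st.2.2 e.1 0) e.2 1))
    (PySem.Dict.empty, PySem.Dict.empty, rows0)

-- reach = {p: set(cs) for p, cs in children.items()}
def pvReach0 (children : PySem.Dict Int (List Int)) : PySem.Dict Int (PySem.Set Int) :=
  children.items.foldl (fun d pc => d.insert pc.1 (PySem.Set.ofList pc.2)) PySem.Dict.empty

-- one round of  reach = {p: set(cs).union(*(reach.get(c, set()) for c in cs)) …}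
def pvReachStep (children : PySem.Dict Int (List Int)) (reach : PySem.Dict Int (PySem.Set Int)) :
    PySem.Dict Int (PySem.Set Int) :=
  children.items.foldl
    (fun d pc =>
      d.insert pc.1 (pc.2.foldl (fun S c => PySem.Set.update S (reach.getD c [])) (PySem.Set.ofList pc.2)))
    PySem.Dict.empty

def calculate_relationships_alt (edges : List (Int × Int)) (node_count : Int) : List (List Int) :=
  let st := pvScan edges (List.replicate node_count.toNat (List.replicate 5 0))
  let children := st.1
  let parents := st.2.1
  -- all-pairs reachability: len(edges) rounds of R := E ∪ E∘R
  let reach := (List.range edges.length).foldl (fun r _ => pvReachStep children r) (pvReach0 children)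
  let rows1 := (PySem.List.pyRange 1 (node_count + 1)).foldl
      (fun rows s =>
        let direct := PySem.Set.ofList (children.getD s [])
        (reach.getD s []).foldl
          (fun rows d =>
            if d != s && !direct.contains d then pvBump (pvBump rows s 2) d 3 else rows)
          rows)
      st.2.2
  (PySem.List.pyRange 1 (node_count + 1)).foldl
      (fun rows node =>
        let ps := parents.getD node []
        let u := PySem.Set.ofList (ps.flatMap (fun p => children.getD p []))
        rows.modify (node - 1).toNat
          (fun row => row.set 4 (if ps.isEmpty then 0 else (u.length : Int) - 1)))
      rows1

-- ===== PRECONDITION & SPEC =====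

-- exactly the inputs on which A returns: every edge endpoint v must keep the row
-- index v-1 inside Python's accepted range [-node_count, node_count), i.e.
-- 1 - node_count ≤ v ≤ node_count; otherwise A raises IndexError.
def Pre_calculate_relationships (edges : List (Int × Int)) (node_count : Int) : Prop :=
  ∀ e ∈ edges, 1 - node_count ≤ e.1 ∧ e.1 ≤ node_count ∧ 1 - node_count ≤ e.2 ∧ e.2 ≤ node_count
instance (edges : List (Int × Int)) (node_count : Int) : Decidable (Pre_calculate_relationships edges node_count) := by unfold Pre_calculate_relationships; infer_instance

def pvWitness_calculate_relationships : (List (Int × Int)) × Int := ([(1, 2), (2, 3), (1, 3)], 3)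

def Spec_calculate_relationships (edges : List (Int × Int)) (node_count : Int) (out : List (List Int)) : Prop := out = calculate_relationships_alt edges node_count
instance (edges : List (Int × Int)) (node_count : Int) (out : List (List Int)) : Decidable (Spec_calculate_relationships edges node_count out) := by unfold Spec_calculate_relationships; infer_instance

-- ===== CLAIM (what is proved, stated in full; the proofs are below) =====
def Claim_equal_calculate_relationships : Prop := ∀ (edges : List (Int × Int)) (node_count : Int), Dom_calculate_relationships edges node_count → Pre_calculate_relationships edges node_count → Spec_calculate_relationships edges node_count (calculate_relationships edges node_count)

-- ===== LEMMAS AND PROOFS =====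

lemma pvRadj_getD (edges : List (Int × Int)) (c : Int) :
    (pvRadj edges).getD c [] = ((edges.map (fun e => (e.2, e.1))).filter (fun e => e.1 == c)).map (·.2) := by
  have := PySem.Dict.getD_foldl_modify_append (edges.map (fun e => (e.2, e.1))) (PySem.Dict.empty (κ := Int) (ν := List Int)) c
  simp only [List.foldl_map] at this
  simpa [pvRadj] using this

lemma pvRow_comm (r : List Int) (j k : Nat) :
    (r.modify j (· + 1)).modify k (· + 1) = (r.modify k (· + 1)).modify j (· + 1) := by
  apply List.ext_getElem (by simp)
  intro n h1 h2
  simp only [List.getElem_modify]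
  split_ifs <;> ring

lemma pvModify2_comm (l : List (List Int)) (n1 n2 : Nat) (j k : Nat) :
    (l.modify n1 (fun row => row.modify j (· + 1))).modify n2 (fun row => row.modify k (· + 1))
      = (l.modify n2 (fun row => row.modify k (· + 1))).modify n1 (fun row => row.modify j (· + 1)) := by
  apply List.ext_getElem (by simp)
  intro n h1 h2
  simp only [List.getElem_modify]
  split_ifs <;> first | rfl | exact pvRow_comm _ _ _

lemma pvBump_comm (l : List (List Int)) (a b : Int) (j k : Nat) :
    pvBump (pvBump l a j) b k = pvBump (pvBump l b k) a j := by
  unfold pvBump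
  simp only [List.length_modify]
  exact pvModify2_comm l _ _ j k

lemma pvBump4_comm (z : List (List Int)) (a1 a2 b1 b2 : Int) (j1 j2 k1 k2 : Nat) :
    pvBump (pvBump (pvBump (pvBump z a1 j1) a2 j2) b1 k1) b2 k2 =
      pvBump (pvBump (pvBump (pvBump z b1 k1) b2 k2) a1 j1) a2 j2 := by
  rw [pvBump_comm (pvBump z a1 j1) a2 b1 j2 k1]
  rw [pvBump_comm z a1 b1 j1 k1]
  rw [pvBump_comm (pvBump (pvBump z b1 k1) a1 j1) a2 b2 j2 k2]
  rw [pvBump_comm (pvBump z b1 k1) a1 b2 j1 k2]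

-- nested degree loop = loop over the flattened (parent, child) pairs
lemma pvNested (items : List (Int × List Int)) (init : List (List Int)) :
    items.foldl (fun l pc => pc.2.foldl (fun l c => pvBump (pvBump l pc.1 0) c 1) l) init
      = (items.flatMap (fun pc => pc.2.map (fun c => (pc.1, c)))).foldl
          (fun l e => pvBump (pvBump l e.1 0) e.2 1) init := by
  induction items generalizing init with
  | nil => rfl
  | cons pc t ih =>
    simp only [List.foldl_cons, List.flatMap_cons, List.foldl_append, List.foldl_map]
    exact ih _

def pvFlat (d : PySem.Dict Int (List Int)) : List (Int × Int) :=
  d.items.flatMap (fun pc => pc.2.map (fun c => (pc.1, c)))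

lemma pvFlat_replace (k c : Int) (cs : List Int) :
    ∀ (l : List (Int × List Int)), (l.map Prod.fst).Nodup →
    l.find? (fun p => p.1 == k) = some (k, cs) →
    ((l.map (fun p => if p.1 == k then (k, cs ++ [c]) else p)).flatMap
        (fun pc => pc.2.map (fun c => (pc.1, c)))).Perm
      (l.flatMap (fun pc => pc.2.map (fun c => (pc.1, c))) ++ [(k, c)]) := by
  intro l
  induction l with
  | nil => intro _ h; simp at h
  | cons p t ih =>
    intro hnd hfind
    by_cases hpk : p.1 = k
    · rw [List.find?_cons] at hfind
      rw [show (p.1 == k) = true by simp [hpk]] at hfind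
      simp only [] at hfind
      have hp : p = (k, cs) := Option.some.inj hfind
      subst hp
      have hknot : k ∉ t.map Prod.fst := by
        simp only [List.map_cons, List.nodup_cons] at hnd
        exact hnd.1
      have htid : t.map (fun p => if p.1 == k then (k, cs ++ [c]) else p) = t := by
        have h1 : ∀ q ∈ t, (fun p : Int × List Int => if p.1 == k then (k, cs ++ [c]) else p) q = id q := by
          intro q hq
          have : q.1 ≠ k := fun h => hknot (h ▸ List.mem_map_of_mem hq)
          simp [this]
        rw [List.map_congr_left h1, List.map_id]
      simp only [List.map_cons, beq_self_eq_true, if_true, htid, List.flatMap_cons,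
        List.map_append, List.map_cons, List.map_nil, List.append_assoc, List.nil_append]
      exact List.Perm.append_left _ (List.perm_append_comm)
    · rw [List.find?_cons] at hfind
      rw [show (p.1 == k) = false by simp [hpk]] at hfind
      simp only [] at hfind
      have hnd' : (t.map Prod.fst).Nodup := by
        simp only [List.map_cons, List.nodup_cons] at hnd
        exact hnd.2
      have := ih hnd' hfind
      simp only [List.map_cons, List.flatMap_cons]
      rw [if_neg (by simp [hpk]), List.append_assoc]
      exact List.Perm.append_left _ this

lemma pvFlat_modify (d : PySem.Dict Int (List Int)) (k c : Int) (hnd : d.keys.Nodup) :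
    (pvFlat (d.modify k [] (· ++ [c]))).Perm (pvFlat d ++ [(k, c)]) := by
  unfold pvFlat
  show ((d.insert k (d.getD k [] ++ [c])).items.flatMap _).Perm _
  cases hk : d.contains k with
  | false =>
    rw [PySem.Dict.getD_of_not_contains d [] hk, PySem.Dict.items_insert_of_not_contains d _ hk]
    simp
  | true =>
    have hsome : (d.get? k).isSome := by rw [← PySem.Dict.contains_eq_isSome_get?, hk]
    rcases Option.isSome_iff_exists.1 hsome with ⟨cs, hcs⟩
    rw [PySem.Dict.getD_of_get?_eq_some d [] hcs, PySem.Dict.items_insert_of_contains d _ hk]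
    have hfind : d.items.find? (fun p => p.1 == k) = some (k, cs) := by
      have : (d.items.find? (fun p => p.1 == k)).map (·.2) = some cs := hcs
      rcases hfind2 : d.items.find? (fun p => p.1 == k) with _ | p
      · rw [hfind2] at this; cases this
      · rw [hfind2] at this
        have h2 : p.2 = cs := Option.some.inj this
        have h1 : p.1 = k := by
          have := List.find?_some hfind2
          simpa using this
        have hpk : p = (k, cs) := by cases p; simp_all
        rw [hpk] at hfind2
        exact hfind2
    exact pvFlat_replace k c cs d.items hnd hfind

lemma pv_nodup_keys_modify (d : PySem.Dict Int (List Int)) (k : Int) (c : Int) (hnd : d.keys.Nodup) :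
    (d.modify k [] (· ++ [c])).keys.Nodup := by
  rw [PySem.Dict.keys_modify]
  cases hk : d.contains k with
  | true => rw [PySem.Dict.keys_insert_of_contains d _ hk]; exact hnd
  | false =>
    rw [PySem.Dict.keys_insert_of_not_contains d _ hk]
    refine List.Nodup.append hnd (List.nodup_singleton k) ?_
    intro a ha hb
    rw [List.mem_singleton] at hb
    subst hb
    exact absurd ((PySem.Dict.contains_iff_mem_keys d a).2 ha) (by simp [hk])

lemma pvFlat_foldl (es : List (Int × Int)) :
    ∀ (d : PySem.Dict Int (List Int)), d.keys.Nodup →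
    (pvFlat (es.foldl (fun d e => d.modify e.1 [] (· ++ [e.2])) d)).Perm (pvFlat d ++ es) := by
  induction es with
  | nil => intro d _; simp
  | cons e t ih =>
    intro d hnd
    simp only [List.foldl_cons]
    have h1 := ih (d.modify e.1 [] (· ++ [e.2])) (pv_nodup_keys_modify d e.1 e.2 hnd)
    refine h1.trans ?_
    have h2 := List.Perm.append_right t (pvFlat_modify d e.1 e.2 hnd)
    refine h2.trans ?_
    simp

lemma pvFlat_pvAdj (edges : List (Int × Int)) : (pvFlat (pvAdj edges)).Perm edges := by
  have := pvFlat_foldl edges PySem.Dict.empty PySem.Dict.nodup_keys_empty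
  unfold pvAdj
  simpa [pvFlat] using this

-- phase 1: A's degree loop over adjacency items = B's direct edge loop
lemma pvPhase1 (edges : List (Int × Int)) (init : List (List Int)) :
    (pvAdj edges).items.foldl (fun l pc => pc.2.foldl (fun l c => pvBump (pvBump l pc.1 0) c 1) l) init
      = edges.foldl (fun l e => pvBump (pvBump l e.1 0) e.2 1) init := by
  rw [pvNested]
  exact List.Perm.foldl_eq' (pvFlat_pvAdj edges)
    (fun x _ y _ z => pvBump4_comm z x.1 x.2 y.1 y.2 0 1 0 1) init

-- membership characterisations of the two dicts
lemma mem_pvAdj (edges : List (Int × Int)) (p c : Int) :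
    c ∈ (pvAdj edges).getD p [] ↔ (p, c) ∈ edges := by
  rw [pvAdj_getD]
  constructor
  · intro h
    rcases List.mem_map.1 h with ⟨e, he, rfl⟩
    have h1 := List.mem_of_mem_filter he
    have h2 : e.1 = p := by simpa using List.of_mem_filter he
    rwa [show ((p : Int), e.2) = e by cases e; simp_all]
  · intro h
    exact List.mem_map.2 ⟨(p, c), List.mem_filter.2 ⟨h, by simp⟩, rfl⟩

lemma mem_pvRadj (edges : List (Int × Int)) (n p : Int) :
    p ∈ (pvRadj edges).getD n [] ↔ (p, n) ∈ edges := by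
  rw [pvRadj_getD]
  constructor
  · intro h
    rcases List.mem_map.1 h with ⟨e, he, rfl⟩
    rcases List.mem_map.1 (List.mem_of_mem_filter he) with ⟨e0, he0, rfl⟩
    have h2 : e0.2 = n := by simpa using List.of_mem_filter he
    have he0' : e0 = (e0.1, n) := by cases e0; simp_all
    exact he0' ▸ he0
  · intro h
    refine List.mem_map.2 ⟨(n, p), List.mem_filter.2 ⟨List.mem_map.2 ⟨(p, n), h, rfl⟩, by simp⟩, rfl⟩

lemma pvScan_aux (es : List (Int × Int)) (d1 d2 : PySem.Dict Int (List Int)) (r : List (List Int)) :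
    (es.foldl (fun st e => (st.1.modify e.1 [] (· ++ [e.2]), st.2.1.modify e.2 [] (· ++ [e.1]),
        pvBump (pvBump st.2.2 e.1 0) e.2 1)) (d1, d2, r))
      = (es.foldl (fun d e => d.modify e.1 [] (· ++ [e.2])) d1,
         es.foldl (fun d e => d.modify e.2 [] (· ++ [e.1])) d2,
         es.foldl (fun l e => pvBump (pvBump l e.1 0) e.2 1) r) := by
  induction es generalizing d1 d2 r with
  | nil => rfl
  | cons e t ih => simp only [List.foldl_cons]; exact ih _ _ _

lemma pvScan_fst (edges : List (Int × Int)) (rows0 : List (List Int)) :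
    (pvScan edges rows0).1 = pvAdj edges := by
  unfold pvScan pvAdj; rw [pvScan_aux]

lemma pvScan_snd (edges : List (Int × Int)) (rows0 : List (List Int)) :
    (pvScan edges rows0).2.1 = pvRadj edges := by
  unfold pvScan pvRadj; rw [pvScan_aux]

lemma pvScan_rows (edges : List (Int × Int)) (rows0 : List (List Int)) :
    (pvScan edges rows0).2.2 = edges.foldl (fun l e => pvBump (pvBump l e.1 0) e.2 1) rows0 := by
  unfold pvScan; rw [pvScan_aux]

-- phase 3: the sibling-set fold is the set of the flattened children lists
lemma pvSibUnion (ps : List Int) (g : Int → List Int) :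
    ∀ S : PySem.Set Int, ps.foldl (fun S p => PySem.Set.update S (g p)) S = S.update (ps.flatMap g) := by
  induction ps with
  | nil => intro S; simp [PySem.Set.update_nil]
  | cons p t ih =>
    intro S
    simp only [List.foldl_cons, List.flatMap_cons, PySem.Set.update_append]
    exact ih _

-- phase 3: A's discard-then-count equals B's |union| − 1 formula
lemma pvPhase3Val (edges : List (Int × Int)) (node : Int) :
    ((PySem.Set.discard
        (((pvRadj edges).getD node []).foldl
          (fun S p => PySem.Set.update S ((pvAdj edges).getD p [])) PySem.Set.empty)
        node).length : Int)
      = (if ((pvRadj edges).getD node []).isEmpty then 0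
         else ((PySem.Set.ofList (((pvRadj edges).getD node []).flatMap
                  (fun p => (pvAdj edges).getD p []))).length : Int) - 1) := by
  rw [pvSibUnion, PySem.Set.update_empty]
  rcases hps : (pvRadj edges).getD node [] with _ | ⟨p, t⟩
  · simp [PySem.Set.discard, PySem.Set.ofList_nil, PySem.Set.empty]
  · have hpmem : p ∈ (pvRadj edges).getD node [] := by rw [hps]; exact List.mem_cons_self
    have hedge : (p, node) ∈ edges := (mem_pvRadj edges node p).1 hpmem
    have hnode : node ∈ ((p :: t).flatMap (fun q => (pvAdj edges).getD q [])) := by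
      refine List.mem_flatMap.2 ⟨p, List.mem_cons_self, ?_⟩
      exact (mem_pvAdj edges p node).2 hedge
    set u := PySem.Set.ofList ((p :: t).flatMap (fun q => (pvAdj edges).getD q [])) with hu
    have humem : node ∈ u := by rw [hu]; exact (PySem.Set.mem_ofList _ _).2 hnode
    have hnodup : u.Nodup := PySem.Set.nodup_ofList _
    have hdisc : PySem.Set.discard u node = u.erase node := by
      rw [List.Nodup.erase_eq_filter hnodup]
      rfl
    rw [hdisc]
    have hlen := List.length_erase_of_mem humem
    have hpos : 0 < u.length := List.length_pos_of_mem humem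
    simp only [List.isEmpty_cons]
    rw [hlen, Nat.cast_sub hpos]
    simp

-- ---------- A's BFS recast as a counted-node list (proof-only) ----------

def pvHQmap {allv : List Int} {Q : List (Int × Int)} (h : ∀ e ∈ Q, e.1 ∈ allv) :
    ∀ x ∈ Q.map Prod.fst, x ∈ allv :=
  fun x hx => by
    rcases List.mem_map.1 hx with ⟨e, he, rfl⟩
    exact h e he

-- plain reachability traversal (proof-only device: the set of nodes A's BFS visits)
def bfsB (adj : PySem.Dict Int (List Int)) (allv : List Int)
    (hadj : ∀ p y, y ∈ adj.getD p [] → y ∈ allv)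
    (Q : List Int) (V : PySem.Set Int) (hQ : ∀ x ∈ Q, x ∈ allv) : PySem.Set Int :=
  match Q with
  | [] => V
  | x :: rest =>
    if hx : V.contains x then
      bfsB adj allv hadj rest V (fun e he => hQ e (List.mem_cons_of_mem _ he))
    else
      bfsB adj allv hadj
        (rest ++ (adj.getD x []).filter (fun y => !(PySem.Set.add V x).contains y))
        (PySem.Set.add V x)
        (by
          intro e he
          rcases List.mem_append.1 he with h | h
          · exact hQ e (List.mem_cons_of_mem _ h)
          · exact hadj x e (List.mem_of_mem_filter h))
  termination_by ((allv.filter (fun v => !V.contains v)).length, Q.length)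
  decreasing_by
  · exact Prod.Lex.right _ (Nat.lt_succ_self _)
  · exact Prod.Lex.left _ _ (pv_measure_lt allv V x (hQ x (List.mem_cons_self)) hx)

def pvCnt (adj : PySem.Dict Int (List Int)) (allv : List Int)
    (hadj : ∀ p y, y ∈ adj.getD p [] → y ∈ allv)
    (Q : List (Int × Int)) (V : PySem.Set Int)
    (hQ : ∀ e ∈ Q, e.1 ∈ allv) : List Int :=
  match Q with
  | [] => []
  | (x, d) :: rest =>
    if hx : V.contains x then
      pvCnt adj allv hadj rest V (fun e he => hQ e (List.mem_cons_of_mem _ he))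
    else
      (if d > 1 then [x] else []) ++
        pvCnt adj allv hadj
          (rest ++ ((adj.getD x []).filter (fun y => !(PySem.Set.add V x).contains y)).map (fun y => (y, d + 1)))
          (PySem.Set.add V x)
          (by
            intro e he
            rcases List.mem_append.1 he with h | h
            · exact hQ e (List.mem_cons_of_mem _ h)
            · rcases List.mem_map.1 h with ⟨y, hy, rfl⟩
              exact hadj x y (List.mem_of_mem_filter hy))
  termination_by ((allv.filter (fun v => !V.contains v)).length, Q.length)
  decreasing_by
  · exact Prod.Lex.right _ (Nat.lt_succ_self _)
  · exact Prod.Lex.left _ _ (pv_measure_lt allv V x (hQ (x, d) (List.mem_cons_self)) hx)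

lemma bfsA_eq (adj : PySem.Dict Int (List Int)) (allv : List Int)
    (hadj : ∀ p y, y ∈ adj.getD p [] → y ∈ allv) (s : Int) :
    ∀ (Q : List (Int × Int)) (V : PySem.Set Int) (hQ : ∀ e ∈ Q, e.1 ∈ allv) (l : List (List Int)),
      bfsA adj allv hadj s Q V l hQ
        = (pvCnt adj allv hadj Q V hQ).foldl (fun l d => pvBump (pvBump l s 2) d 3) l := by
  intro Q V hQ
  induction Q, V, hQ using pvCnt.induct adj allv hadj with
  | case1 V hQ hQ' => intro l; rw [bfsA, pvCnt]; rfl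
  | case2 V x d rest hQ hx hQ' ih =>
    intro l
    rw [bfsA, pvCnt]
    simp only [hx, dif_pos]
    exact ih l
  | case3 V x d rest hQ hx hQ' ih =>
    intro l
    rw [bfsA, pvCnt]
    simp only [hx, dif_neg, not_false_iff]
    by_cases hd : d > 1
    · simp only [hd, if_true, List.foldl_cons, List.singleton_append, List.foldl_cons]
      exact ih _
    · simp only [hd, if_false, List.nil_append]
      exact ih l

lemma bfsB_mono (adj : PySem.Dict Int (List Int)) (allv : List Int)
    (hadj : ∀ p y, y ∈ adj.getD p [] → y ∈ allv) :
    ∀ (Q : List Int) (V : PySem.Set Int) (hQ : ∀ x ∈ Q, x ∈ allv) (y : Int),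
      y ∈ V → y ∈ bfsB adj allv hadj Q V hQ := by
  intro Q V hQ
  induction Q, V, hQ using bfsB.induct adj allv hadj with
  | case1 V hQ hQ' => intro y hy; rw [bfsB]; exact hy
  | case2 V x rest hQ hx hQ' ih =>
    intro y hy
    rw [bfsB]
    simp only [hx, dif_pos]
    exact ih y hy
  | case3 V x rest hQ hx hQ' ih =>
    intro y hy
    rw [bfsB]
    simp only [hx, dif_neg, not_false_iff]
    exact ih y ((PySem.Set.mem_add V x y).2 (Or.inl hy))

lemma bfsB_nodup (adj : PySem.Dict Int (List Int)) (allv : List Int)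
    (hadj : ∀ p y, y ∈ adj.getD p [] → y ∈ allv) :
    ∀ (Q : List Int) (V : PySem.Set Int) (hQ : ∀ x ∈ Q, x ∈ allv),
      V.Nodup → (bfsB adj allv hadj Q V hQ).Nodup := by
  intro Q V hQ
  induction Q, V, hQ using bfsB.induct adj allv hadj with
  | case1 V hQ hQ' => intro h; rw [bfsB]; exact h
  | case2 V x rest hQ hx hQ' ih =>
    intro h
    rw [bfsB]
    simp only [hx, dif_pos]
    exact ih h
  | case3 V x rest hQ hx hQ' ih =>
    intro h
    rw [bfsB]
    simp only [hx, dif_neg, not_false_iff]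
    exact ih (PySem.Set.nodup_add V x h)

-- one-step unfoldings of bfsB with free proof arguments (proof irrelevance)
lemma bfsB_cons_skip (adj : PySem.Dict Int (List Int)) (allv : List Int)
    (hadj : ∀ p y, y ∈ adj.getD p [] → y ∈ allv) (x : Int) (rest : List Int)
    (V : PySem.Set Int) (h1 : ∀ z ∈ x :: rest, z ∈ allv) (hx : V.contains x = true)
    (h2 : ∀ z ∈ rest, z ∈ allv) :
    bfsB adj allv hadj (x :: rest) V h1 = bfsB adj allv hadj rest V h2 := by
  rw [bfsB]
  simp only [hx, dif_pos]

lemma bfsB_cons_fresh (adj : PySem.Dict Int (List Int)) (allv : List Int)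
    (hadj : ∀ p y, y ∈ adj.getD p [] → y ∈ allv) (x : Int) (rest : List Int)
    (V : PySem.Set Int) (h1 : ∀ z ∈ x :: rest, z ∈ allv) (hx : ¬ V.contains x = true)
    (h2 : ∀ z ∈ rest ++ (adj.getD x []).filter (fun y => !(PySem.Set.add V x).contains y), z ∈ allv) :
    bfsB adj allv hadj (x :: rest) V h1
      = bfsB adj allv hadj (rest ++ (adj.getD x []).filter (fun y => !(PySem.Set.add V x).contains y))
          (PySem.Set.add V x) h2 := by
  rw [bfsB, dif_neg hx]

-- the BFS invariant: counted nodes are exactly final-reachable ∖ visited ∖ direct children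
lemma pvCnt_char (adj : PySem.Dict Int (List Int)) (allv : List Int)
    (hadj : ∀ p y, y ∈ adj.getD p [] → y ∈ allv) (s : Int) :
    ∀ (Q : List (Int × Int)) (V : PySem.Set Int) (hQ : ∀ e ∈ Q, e.1 ∈ allv),
      s ∈ V →
      (∀ e ∈ Q, e.1 ∉ V → 1 ≤ e.2) →
      (∀ e ∈ Q, e.2 = 1 → e.1 ∈ adj.getD s []) →
      (∀ y ∈ adj.getD s [], y ∉ V → Q.find? (fun e => e.1 == y) = some (y, 1)) →
      (∀ z, z ∈ pvCnt adj allv hadj Q V hQ ↔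
          (z ∈ bfsB adj allv hadj (Q.map Prod.fst) V (pvHQmap hQ) ∧ z ∉ V ∧ z ∉ adj.getD s []))
        ∧ (pvCnt adj allv hadj Q V hQ).Nodup := by
  intro Q V hQ
  induction Q, V, hQ using pvCnt.induct adj allv hadj with
  | case1 V hQ hQ' =>
    intro _ _ _ _
    constructor
    · intro z
      rw [pvCnt]
      simp only [List.map_nil, List.not_mem_nil, false_iff]
      rw [bfsB]
      rintro ⟨h1, h2, _⟩
      exact h2 h1
    · rw [pvCnt]; exact List.nodup_nil
  | case2 V x d rest hQ hx hQ' ih =>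
    intro inv1 inv2 inv3 inv4
    have hxV : x ∈ V := (PySem.Set.contains_iff V x).1 hx
    have inv2' : ∀ e ∈ rest, e.1 ∉ V → 1 ≤ e.2 := fun e he => inv2 e (List.mem_cons_of_mem _ he)
    have inv3' : ∀ e ∈ rest, e.2 = 1 → e.1 ∈ adj.getD s [] := fun e he => inv3 e (List.mem_cons_of_mem _ he)
    have inv4' : ∀ y ∈ adj.getD s [], y ∉ V → rest.find? (fun e => e.1 == y) = some (y, 1) := by
      intro y hy hyV
      have h := inv4 y hy hyV
      rw [List.find?_cons] at h
      have hne : (((x, d) : Int × Int).1 == y) = false := by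
        simp only [beq_eq_false_iff_ne]
        intro hxy
        exact hyV (hxy ▸ hxV)
      rw [hne] at h
      exact h
    have IH := ih inv1 inv2' inv3' inv4'
    have hbfs : bfsB adj allv hadj (((x, d) :: rest).map Prod.fst) V (pvHQmap hQ)
        = bfsB adj allv hadj (rest.map Prod.fst) V
            (pvHQmap (fun e he => hQ e (List.mem_cons_of_mem _ he))) :=
      bfsB_cons_skip adj allv hadj x (rest.map Prod.fst) V (pvHQmap hQ) hx _
    constructor
    · intro z
      rw [pvCnt]
      simp only [hx, dif_pos]
      rw [IH.1 z, hbfs]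
    · rw [pvCnt]
      simp only [hx, dif_pos]
      exact IH.2
  | case3 V x d rest hQ hx hQ' ih =>
    intro inv1 inv2 inv3 inv4
    have hxV : x ∉ V := fun h => hx ((PySem.Set.contains_iff V x).2 h)
    have hd1 : 1 ≤ d := inv2 (x, d) List.mem_cons_self hxV
    have hVsub : ∀ z, z ∈ V → z ∈ PySem.Set.add V x := fun z hz => (PySem.Set.mem_add V x z).2 (Or.inl hz)
    have hxV' : x ∈ PySem.Set.add V x := (PySem.Set.mem_add V x x).2 (Or.inr rfl)
    have inv1' : s ∈ PySem.Set.add V x := hVsub s inv1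
    have hQnext : ∀ e ∈ rest ++ ((adj.getD x []).filter (fun y => !(PySem.Set.add V x).contains y)).map (fun y => (y, d + 1)), e.1 ∈ allv := by
      intro e he
      rcases List.mem_append.1 he with h | h
      · exact hQ e (List.mem_cons_of_mem _ h)
      · rcases List.mem_map.1 h with ⟨y, hy, rfl⟩
        exact hadj x y (List.mem_of_mem_filter hy)
    have inv2' : ∀ e ∈ rest ++ ((adj.getD x []).filter (fun y => !(PySem.Set.add V x).contains y)).map (fun y => (y, d + 1)),
        e.1 ∉ PySem.Set.add V x → 1 ≤ e.2 := by
      intro e he heV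
      rcases List.mem_append.1 he with h | h
      · exact inv2 e (List.mem_cons_of_mem _ h) (fun hv => heV (hVsub _ hv))
      · rcases List.mem_map.1 h with ⟨y, _, rfl⟩
        omega
    have inv3' : ∀ e ∈ rest ++ ((adj.getD x []).filter (fun y => !(PySem.Set.add V x).contains y)).map (fun y => (y, d + 1)),
        e.2 = 1 → e.1 ∈ adj.getD s [] := by
      intro e he h1
      rcases List.mem_append.1 he with h | h
      · exact inv3 e (List.mem_cons_of_mem _ h) h1
      · rcases List.mem_map.1 h with ⟨y, _, rfl⟩
        simp only at h1
        omega
    have inv4' : ∀ y ∈ adj.getD s [], y ∉ PySem.Set.add V x →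
        (rest ++ ((adj.getD x []).filter (fun y => !(PySem.Set.add V x).contains y)).map (fun y => (y, d + 1))).find?
            (fun e => e.1 == y) = some (y, 1) := by
      intro y hy hyV'
      have hyV : y ∉ V := fun h => hyV' (hVsub _ h)
      have hyx : y ≠ x := fun h => hyV' (h ▸ hxV')
      have h := inv4 y hy hyV
      rw [List.find?_cons] at h
      have hne : (((x, d) : Int × Int).1 == y) = false := by
        simp only [beq_eq_false_iff_ne]
        exact fun hxy => hyx hxy.symm
      rw [hne] at h
      have h' : rest.find? (fun e => e.1 == y) = some (y, 1) := h
      rw [List.find?_append, h']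
      rfl
    have IH := ih inv1' inv2' inv3' inv4'
    have hbfs : bfsB adj allv hadj (((x, d) :: rest).map Prod.fst) V (pvHQmap hQ)
        = bfsB adj allv hadj
            ((rest ++ ((adj.getD x []).filter (fun y => !(PySem.Set.add V x).contains y)).map (fun y => (y, d + 1))).map Prod.fst)
            (PySem.Set.add V x)
            (pvHQmap hQnext) := by
      have hmap : ((rest ++ ((adj.getD x []).filter (fun y => !(PySem.Set.add V x).contains y)).map (fun y => (y, d + 1))).map Prod.fst)
          = rest.map Prod.fst ++ (adj.getD x []).filter (fun y => !(PySem.Set.add V x).contains y) := by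
        simp only [List.map_append, List.map_map]
        congr 1
        exact (List.map_congr_left (fun a _ => rfl)).trans (List.map_id _)
      refine Eq.trans (bfsB_cons_fresh adj allv hadj x (rest.map Prod.fst) V (pvHQmap hQ) hx ?h2) ?_
      case h2 =>
        intro z hz
        rcases List.mem_append.1 hz with h | h
        · exact pvHQmap (fun e he => hQ e (List.mem_cons_of_mem _ he)) z h
        · exact hadj x z (List.mem_of_mem_filter h)
      have : ∀ (Qa Qb : List Int) (hab : Qa = Qb) (ha : ∀ z ∈ Qa, z ∈ allv) (hb : ∀ z ∈ Qb, z ∈ allv) (W : PySem.Set Int),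
          bfsB adj allv hadj Qa W ha = bfsB adj allv hadj Qb W hb := by
        intro Qa Qb hab
        subst hab
        intro _ _ _
        rfl
      exact this _ _ hmap.symm _ _ _
    have hxFB : x ∈ bfsB adj allv hadj
        ((rest ++ ((adj.getD x []).filter (fun y => !(PySem.Set.add V x).contains y)).map (fun y => (y, d + 1))).map Prod.fst)
        (PySem.Set.add V x) (pvHQmap hQnext) :=
      bfsB_mono adj allv hadj _ _ _ x hxV'
    by_cases hchs : x ∈ adj.getD s []
    · -- x is a direct child: its first queue entry has depth 1, it is not counted
      have hfind := inv4 x hchs hxV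
      rw [List.find?_cons] at hfind
      have heq : (((x, d) : Int × Int).1 == x) = true := by simp
      rw [heq] at hfind
      have hd' : d = 1 := by
        have : ((x, d) : Int × Int) = (x, 1) := Option.some.inj hfind
        simpa using congrArg Prod.snd this
      subst hd'
      have hnotgt : ¬ ((1 : Int) > 1) := by omega
      constructor
      · intro z
        rw [pvCnt, dif_neg hx]
        simp only [hnotgt, if_false, List.nil_append]
        rw [IH.1 z, hbfs]
        constructor
        · rintro ⟨hzFB, hzV', hzchs⟩
          exact ⟨hzFB, fun h => hzV' (hVsub _ h), hzchs⟩
        · rintro ⟨hzFB, hzV, hzchs⟩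
          have hzx : z ≠ x := fun h => hzchs (h ▸ hchs)
          refine ⟨hzFB, ?_, hzchs⟩
          intro h
          rcases (PySem.Set.mem_add V x z).1 h with h | h
          · exact hzV h
          · exact hzx h
      · rw [pvCnt]
        simp only [hx, dif_neg, not_false_iff, hnotgt, if_false, List.nil_append]
        exact IH.2
    · -- x is not a direct child: its depth is ≥ 2 and it is counted
      have hdne : d ≠ 1 := fun h => hchs (inv3 (x, d) List.mem_cons_self h)
      have hdgt : d > 1 := by omega
      constructor
      · intro z
        rw [pvCnt, dif_neg hx]
        simp only [hdgt, if_true, List.singleton_append, List.mem_cons]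
        rw [IH.1 z, hbfs]
        constructor
        · rintro (rfl | ⟨hzFB, hzV', hzchs⟩)
          · exact ⟨hxFB, hxV, hchs⟩
          · exact ⟨hzFB, fun h => hzV' (hVsub _ h), hzchs⟩
        · rintro ⟨hzFB, hzV, hzchs⟩
          by_cases hzx : z = x
          · exact Or.inl hzx
          · refine Or.inr ⟨hzFB, ?_, hzchs⟩
            intro h
            rcases (PySem.Set.mem_add V x z).1 h with h | h
            · exact hzV h
            · exact hzx h
      · rw [pvCnt]
        simp only [hx, dif_neg, not_false_iff, hdgt, if_true, List.singleton_append]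
        refine List.nodup_cons.2 ⟨?_, IH.2⟩
        intro hxcnt
        have := (IH.1 x).1 hxcnt
        exact this.2.1 hxV'

lemma bfsB_congrQ (adj : PySem.Dict Int (List Int)) (allv : List Int)
    (hadj : ∀ p y, y ∈ adj.getD p [] → y ∈ allv) (Qa Qb : List Int) (hab : Qa = Qb)
    (W : PySem.Set Int) (ha : ∀ z ∈ Qa, z ∈ allv) (hb : ∀ z ∈ Qb, z ∈ allv) :
    bfsB adj allv hadj Qa W ha = bfsB adj allv hadj Qb W hb := by
  subst hab
  rfl

lemma pv_find_map (y : Int) (d : Int) :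
    ∀ (l : List Int), y ∈ l →
      (l.map (fun z => (z, d))).find? (fun e => e.1 == y) = some (y, d) := by
  intro l
  induction l with
  | nil => intro h; cases h
  | cons a t ih =>
    intro hy
    by_cases hay : a = y
    · subst hay
      simp [List.find?_cons]
    · rw [List.map_cons, List.find?_cons]
      have : (((a, d) : Int × Int).1 == y) = false := by simpa using hay
      rw [this]
      refine ih ?_
      rcases List.mem_cons.1 hy with h | h
      · exact absurd h.symm hay
      · exact h

-- per-source equality: A's depth-BFS bumps = bumps over the visited set minus self
-- minus direct children (bfsB = the visited set, a proof-only device)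
lemma pvPhase2Step (adj : PySem.Dict Int (List Int)) (allv : List Int)
    (hadj : ∀ p y, y ∈ adj.getD p [] → y ∈ allv) (s : Int)
    (hQ0 : ∀ e ∈ [((s : Int), (0 : Int))], e.1 ∈ allv)
    (hQ0' : ∀ x ∈ [s], x ∈ allv) (l : List (List Int)) :
    bfsA adj allv hadj s [(s, 0)] PySem.Set.empty l hQ0
      = (bfsB adj allv hadj [s] PySem.Set.empty hQ0').foldl
          (fun rows d => if d != s && !(PySem.Set.ofList (adj.getD s [])).contains d
            then pvBump (pvBump rows s 2) d 3 else rows) l := by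
  have hnc : ¬ (PySem.Set.empty.contains s = true) := fun h => Bool.noConfusion h
  have hV1 : PySem.Set.add PySem.Set.empty s = [s] := rfl
  have hQ1 : ∀ e ∈ ((adj.getD s []).filter (fun y => !(PySem.Set.add PySem.Set.empty s).contains y)).map (fun y => (y, (0 : Int) + 1)), e.1 ∈ allv := by
    intro e he
    rcases List.mem_map.1 he with ⟨y, hy, rfl⟩
    exact hadj s y (List.mem_of_mem_filter hy)
  have hQ1' : ∀ z ∈ (adj.getD s []).filter (fun y => !(PySem.Set.add PySem.Set.empty s).contains y), z ∈ allv := by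
    intro z hz
    exact hadj s z (List.mem_of_mem_filter hz)
  have e1 : pvCnt adj allv hadj [(s, 0)] PySem.Set.empty hQ0
      = pvCnt adj allv hadj
          (((adj.getD s []).filter (fun y => !(PySem.Set.add PySem.Set.empty s).contains y)).map (fun y => (y, (0 : Int) + 1)))
          (PySem.Set.add PySem.Set.empty s) hQ1 := by
    rw [pvCnt, dif_neg hnc]
    norm_num
  have e2 : bfsB adj allv hadj [s] PySem.Set.empty hQ0'
      = bfsB adj allv hadj ((adj.getD s []).filter (fun y => !(PySem.Set.add PySem.Set.empty s).contains y))
          (PySem.Set.add PySem.Set.empty s) hQ1' :=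
    bfsB_cons_fresh adj allv hadj s [] PySem.Set.empty hQ0' hnc hQ1'
  have inv1 : s ∈ PySem.Set.add PySem.Set.empty s := by rw [hV1]; exact List.mem_singleton.2 rfl
  have CH := pvCnt_char adj allv hadj s
      (((adj.getD s []).filter (fun y => !(PySem.Set.add PySem.Set.empty s).contains y)).map (fun y => (y, (0 : Int) + 1)))
      (PySem.Set.add PySem.Set.empty s) hQ1 inv1
      (by
        intro e he _
        rcases List.mem_map.1 he with ⟨y, _, rfl⟩
        omega)
      (by
        intro e he _
        rcases List.mem_map.1 he with ⟨y, hy, rfl⟩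
        exact List.mem_of_mem_filter hy)
      (by
        intro y hy hyV
        have hys : y ≠ s := by
          rw [hV1] at hyV
          simpa using hyV
        have hyf : y ∈ (adj.getD s []).filter (fun z => !(PySem.Set.add PySem.Set.empty s).contains z) := by
          refine List.mem_filter.2 ⟨hy, ?_⟩
          rw [hV1]
          simpa using hys
        have := pv_find_map y ((0 : Int) + 1) _ hyf
        simpa using this)
  have hmapQ : (((adj.getD s []).filter (fun y => !(PySem.Set.add PySem.Set.empty s).contains y)).map (fun y => (y, (0 : Int) + 1))).map Prod.fst
      = (adj.getD s []).filter (fun y => !(PySem.Set.add PySem.Set.empty s).contains y) := by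
    rw [List.map_map]
    exact (List.map_congr_left (fun a _ => rfl)).trans (List.map_id _)
  have evis : bfsB adj allv hadj
      ((((adj.getD s []).filter (fun y => !(PySem.Set.add PySem.Set.empty s).contains y)).map (fun y => (y, (0 : Int) + 1))).map Prod.fst)
      (PySem.Set.add PySem.Set.empty s) (pvHQmap hQ1)
      = bfsB adj allv hadj [s] PySem.Set.empty hQ0' := by
    rw [e2]
    exact bfsB_congrQ adj allv hadj _ _ hmapQ _ _ _
  have hnodupV : (bfsB adj allv hadj [s] PySem.Set.empty hQ0').Nodup :=
    bfsB_nodup adj allv hadj [s] PySem.Set.empty hQ0' List.nodup_nil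
  have hperm : (pvCnt adj allv hadj [(s, 0)] PySem.Set.empty hQ0).Perm
      ((bfsB adj allv hadj [s] PySem.Set.empty hQ0').filter
        (fun d => d != s && !(PySem.Set.ofList (adj.getD s [])).contains d)) := by
    rw [e1]
    refine (List.perm_ext_iff_of_nodup CH.2 (List.Nodup.filter _ hnodupV)).2 ?_
    intro z
    rw [CH.1 z, evis, List.mem_filter]
    have hzV1 : (z ∉ PySem.Set.add PySem.Set.empty s) ↔ z ≠ s := by
      rw [hV1]
      simp
    rw [hzV1]
    constructor
    · rintro ⟨h1, h2, h3⟩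
      refine ⟨h1, ?_⟩
      simp only [Bool.and_eq_true, bne_iff_ne, Bool.not_eq_true']
      refine ⟨h2, ?_⟩
      rw [← Bool.not_eq_true, PySem.Set.contains_iff]
      intro hc
      exact h3 ((PySem.Set.mem_ofList _ _).1 hc)
    · rintro ⟨h1, hp⟩
      simp only [Bool.and_eq_true, bne_iff_ne, Bool.not_eq_true'] at hp
      refine ⟨h1, hp.1, ?_⟩
      intro hc
      have : (PySem.Set.ofList (adj.getD s [])).contains z = true :=
        (PySem.Set.contains_iff _ z).2 ((PySem.Set.mem_ofList _ _).2 hc)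
      rw [hp.2] at this
      cases this
  rw [bfsA_eq adj allv hadj s [(s, 0)] PySem.Set.empty hQ0 l,
    PySem.List.foldl_if_eq_foldl_filter
      (fun d => d != s && !(PySem.Set.ofList (adj.getD s [])).contains d)
      (fun rows d => pvBump (pvBump rows s 2) d 3)]
  exact List.Perm.foldl_eq' hperm
    (fun x _ y _ z => pvBump4_comm z s x s y 2 3 2 3) l

-- ---------- walks and bounded reachability ----------

-- pvWalk E l: consecutive elements of l are edges of E
def pvWalk (E : List (Int × Int)) : List Int → Prop
  | x :: y :: r => (x, y) ∈ E ∧ pvWalk E (y :: r)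
  | _ => True

def pvReachRel (E : List (Int × Int)) (a b : Int) : Prop :=
  ∃ ms : List Int, pvWalk E (a :: (ms ++ [b]))

def pvReachN (E : List (Int × Int)) (n : Nat) (a b : Int) : Prop :=
  ∃ ms : List Int, pvWalk E (a :: (ms ++ [b])) ∧ ms.length + 1 ≤ n

lemma pvWalk_split (E : List (Int × Int)) :
    ∀ (u : List Int) (x : Int) (v : List Int),
      pvWalk E (u ++ x :: v) → pvWalk E (u ++ [x]) ∧ pvWalk E (x :: v) := by
  intro u
  induction u with
  | nil => intro x v h; exact ⟨trivial, h⟩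
  | cons a u' ih =>
    intro x v h
    cases u' with
    | nil => exact ⟨⟨h.1, trivial⟩, h.2⟩
    | cons b u'' =>
      have h' : (a, b) ∈ E ∧ pvWalk E ((b :: u'') ++ x :: v) := h
      have := ih x v h'.2
      exact ⟨⟨h'.1, this.1⟩, this.2⟩

lemma pvWalk_join (E : List (Int × Int)) :
    ∀ (u : List Int) (x : Int) (v : List Int),
      pvWalk E (u ++ [x]) → pvWalk E (x :: v) → pvWalk E (u ++ x :: v) := by
  intro u
  induction u with
  | nil => intro x v _ h2; exact h2
  | cons a u' ih =>
    intro x v h1 h2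
    cases u' with
    | nil => exact ⟨h1.1, h2⟩
    | cons b u'' =>
      have h1' : (a, b) ∈ E ∧ pvWalk E ((b :: u'') ++ [x]) := h1
      exact ⟨h1'.1, ih x v h1'.2 h2⟩

lemma pvWalk_sources (E : List (Int × Int)) :
    ∀ (ms : List Int) (a b : Int), pvWalk E (a :: ms ++ [b]) →
      ∀ m ∈ a :: ms, m ∈ E.map Prod.fst := by
  intro ms
  induction ms with
  | nil =>
    intro a b h m hm
    rw [List.mem_singleton] at hm
    subst hm
    exact List.mem_map.2 ⟨(m, b), h.1, rfl⟩
  | cons c ms' ih =>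
    intro a b h m hm
    rcases List.mem_cons.1 hm with rfl | hm'
    · exact List.mem_map.2 ⟨(m, c), h.1, rfl⟩
    · exact ih c b h.2 m hm'

lemma pvReach_base (E : List (Int × Int)) (a b : Int) (h : (a, b) ∈ E) : pvReachRel E a b :=
  ⟨[], h, trivial⟩

lemma pvReach_snoc (E : List (Int × Int)) (a x y : Int)
    (hr : pvReachRel E a x) (h : (x, y) ∈ E) : pvReachRel E a y := by
  obtain ⟨ms, w⟩ := hr
  refine ⟨ms ++ [x], ?_⟩
  have := pvWalk_join E (a :: ms) x [y] w ⟨h, trivial⟩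
  simpa [List.append_assoc] using this

lemma pv_dup_decomp : ∀ (l : List Int), ¬ l.Nodup →
    ∃ l1 x l2 l3, l = l1 ++ x :: l2 ++ x :: l3 := by
  intro l
  induction l with
  | nil => intro h; exact absurd List.nodup_nil h
  | cons a t ih =>
    intro h
    by_cases ha : a ∈ t
    · obtain ⟨s, t', hst⟩ := List.append_of_mem ha
      exact ⟨[], a, s, t', by simp [hst]⟩
    · have ht : ¬ t.Nodup := fun hn => h (List.nodup_cons.2 ⟨ha, hn⟩)
      obtain ⟨l1, x, l2, l3, hdec⟩ := ih ht
      exact ⟨a :: l1, x, l2, l3, by simp [hdec]⟩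

-- any walk can be shortened to one of at most len(E) edges (splice out a repeated source)
lemma pv_reach_bound (E : List (Int × Int)) :
    ∀ (k : Nat) (ms : List Int) (a b : Int), ms.length ≤ k →
      pvWalk E (a :: ms ++ [b]) → pvReachN E E.length a b := by
  intro k
  induction k with
  | zero =>
    intro ms a b hlen w
    have hms : ms = [] := List.eq_nil_of_length_eq_zero (by omega)
    subst hms
    have hab : (a, b) ∈ E := w.1
    have hE : 0 < E.length := List.length_pos_of_mem hab
    exact ⟨[], w, by simpa using hE⟩
  | succ k ih =>
    intro ms a b hlen w
    by_cases hnd : (a :: ms).Nodup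
    · have hsub : (a :: ms) ⊆ E.map Prod.fst := fun x hx => pvWalk_sources E ms a b w x hx
      have hle : (a :: ms).length ≤ (E.map Prod.fst).length :=
        (List.Nodup.subperm hnd hsub).length_le
      refine ⟨ms, w, ?_⟩
      simpa using hle
    · obtain ⟨l1, x, l2, l3, hdec⟩ := pv_dup_decomp _ hnd
      have hfull : a :: ms ++ [b] = l1 ++ x :: (l2 ++ x :: (l3 ++ [b])) := by
        have : a :: ms ++ [b] = (a :: ms) ++ [b] := rfl
        rw [this, hdec]
        simp [List.append_assoc]
      rw [hfull] at w
      obtain ⟨w1, w2⟩ := pvWalk_split E l1 x (l2 ++ x :: (l3 ++ [b])) w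
      have w2' : pvWalk E ((x :: l2) ++ x :: (l3 ++ [b])) := w2
      obtain ⟨_, w3⟩ := pvWalk_split E (x :: l2) x (l3 ++ [b]) w2'
      have wj : pvWalk E (l1 ++ x :: (l3 ++ [b])) := pvWalk_join E l1 x (l3 ++ [b]) w1 w3
      have hmslen : ms.length + 1 = l1.length + 1 + l2.length + 1 + l3.length := by
        have := congrArg List.length hdec
        simp [List.length_append] at this
        omega
      cases l1 with
      | nil =>
        have hax : a = x := by
          have : a :: ms = x :: (l2 ++ x :: l3) := by simpa using hdec
          exact (List.cons.injEq _ _ _ _ ▸ this).1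
        subst hax
        refine ih l3 a b (by simp at hmslen; omega) ?_
        simpa using wj
      | cons a0 l1' =>
        have ha0 : a = a0 := by
          have : a :: ms = a0 :: (l1' ++ x :: l2 ++ x :: l3) := by simpa using hdec
          exact (List.cons.injEq _ _ _ _ ▸ this).1
        subst ha0
        have wj' : pvWalk E (a :: (l1' ++ x :: l3) ++ [b]) := by
          have : (a :: l1') ++ x :: (l3 ++ [b]) = a :: (l1' ++ x :: l3) ++ [b] := by
            simp [List.append_assoc]
          rwa [this] at wj
        refine ih (l1' ++ x :: l3) a b ?_ wj'
        have : (l1' ++ x :: l3).length = l1'.length + 1 + l3.length := by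
          simp [List.length_append]
          omega
        simp at hmslen
        omega

lemma pvReachN_mono (E : List (Int × Int)) (n m : Nat) (a b : Int)
    (h : pvReachN E n a b) (hnm : n ≤ m) : pvReachN E m a b := by
  obtain ⟨ms, w, hl⟩ := h
  exact ⟨ms, w, by omega⟩

lemma pvReachN_succ_iff (E : List (Int × Int)) (n : Nat) (a b : Int) :
    pvReachN E (n + 1) a b ↔ (a, b) ∈ E ∨ ∃ c, (a, c) ∈ E ∧ pvReachN E n c b := by
  constructor
  · rintro ⟨ms, w, hl⟩
    cases ms with
    | nil => exact Or.inl w.1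
    | cons c ms' =>
      refine Or.inr ⟨c, w.1, ⟨ms', w.2, ?_⟩⟩
      simp at hl
      omega
  · rintro (h | ⟨c, hc, ⟨ms, w, hl⟩⟩)
    · exact ⟨[], ⟨h, trivial⟩, by simp⟩
    · exact ⟨c :: ms, ⟨hc, w⟩, by simp; omega⟩

lemma pvReachN_zero (E : List (Int × Int)) (a b : Int) : ¬ pvReachN E 0 a b := by
  rintro ⟨ms, _, hl⟩
  omega

lemma pvReach_iff_reachN (E : List (Int × Int)) (a b : Int) :
    pvReachRel E a b ↔ pvReachN E (E.length + 1) a b := by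
  constructor
  · rintro ⟨ms, w⟩
    exact pvReachN_mono E E.length _ a b (pv_reach_bound E ms.length ms a b le_rfl w) (by omega)
  · rintro ⟨ms, w, _⟩
    exact ⟨ms, w⟩

-- ---------- the dict-comprehension rounds ----------

lemma pv_foldl_insert_getD_skip (g : Int × List Int → PySem.Set Int) :
    ∀ (l : List (Int × List Int)) (acc : PySem.Dict Int (PySem.Set Int)) (k : Int),
      (∀ pc ∈ l, pc.1 ≠ k) →
      (l.foldl (fun acc pc => acc.insert pc.1 (g pc)) acc).getD k [] = acc.getD k [] := by
  intro l
  induction l with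
  | nil => intro acc k _; rfl
  | cons pc t ih =>
    intro acc k h
    simp only [List.foldl_cons]
    rw [ih _ k (fun q hq => h q (List.mem_cons_of_mem _ hq))]
    exact PySem.Dict.getD_insert_of_ne _ _ _ (fun hk => h pc List.mem_cons_self hk.symm)

lemma pv_foldl_insert_getD (g : Int × List Int → PySem.Set Int) :
    ∀ (l : List (Int × List Int)) (acc : PySem.Dict Int (PySem.Set Int)) (k : Int),
      (l.map Prod.fst).Nodup →
      (l.foldl (fun acc pc => acc.insert pc.1 (g pc)) acc).getD k []
        = (match l.find? (fun pc => pc.1 == k) with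
           | some pc => g pc
           | none => acc.getD k []) := by
  intro l
  induction l with
  | nil => intro acc k _; rfl
  | cons pc t ih =>
    intro acc k hnd
    simp only [List.map_cons, List.nodup_cons] at hnd
    simp only [List.foldl_cons]
    by_cases hk : pc.1 = k
    · have hfind : (pc :: t).find? (fun q => q.1 == k) = some pc := by
        simp [List.find?_cons, hk]
      rw [hfind]
      have hskip : ∀ q ∈ t, q.1 ≠ k := by
        intro q hq hqk
        refine hnd.1 ?_
        rw [hk, ← hqk]
        exact List.mem_map_of_mem hq
      rw [pv_foldl_insert_getD_skip g t _ k hskip]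
      subst hk
      exact PySem.Dict.getD_insert_self _ _ _ _
    · have hfind : (pc :: t).find? (fun q => q.1 == k) = t.find? (fun q => q.1 == k) := by
        simp [List.find?_cons, hk]
      rw [hfind, ih _ k hnd.2]
      rcases hf : t.find? (fun q => q.1 == k) with _ | q
      · simp only [hf]
        exact PySem.Dict.getD_insert_of_ne _ _ _ (fun h => hk h.symm)
      · simp only [hf]

lemma pv_dict_get?_eq_find? (d : PySem.Dict Int (List Int)) (k : Int) :
    d.get? k = (d.items.find? (fun pc => pc.1 == k)).map (·.2) := rfl

lemma pvAdj_keys_nodup (edges : List (Int × Int)) : (pvAdj edges).keys.Nodup := by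
  unfold pvAdj
  exact PySem.Dict.nodup_keys_foldl_modify_key edges Prod.fst [] (fun d e => (· ++ [e.2]))
    PySem.Dict.empty PySem.Dict.nodup_keys_empty

lemma pvAdj_items_fst_nodup (edges : List (Int × Int)) :
    ((pvAdj edges).items.map Prod.fst).Nodup := pvAdj_keys_nodup edges

-- get?-level characterisations of the children dict
lemma pvAdj_get?_some_mem (edges : List (Int × Int)) (s : Int) (cs : List Int)
    (h : (pvAdj edges).get? s = some cs) (z : Int) : z ∈ cs ↔ (s, z) ∈ edges := by
  rw [← PySem.Dict.getD_of_get?_eq_some (pvAdj edges) [] h]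
  exact mem_pvAdj edges s z

lemma pvAdj_get?_none_not_mem (edges : List (Int × Int)) (s : Int)
    (h : (pvAdj edges).get? s = none) (z : Int) : (s, z) ∉ edges := by
  intro hz
  have := (mem_pvAdj edges s z).2 hz
  rw [PySem.Dict.getD_of_get?_eq_none (pvAdj edges) [] h] at this
  cases this

-- membership in the per-key union fold
lemma pv_mem_foldl_update (g : Int → PySem.Set Int) :
    ∀ (cs : List Int) (S : PySem.Set Int) (z : Int),
      z ∈ cs.foldl (fun S c => PySem.Set.update S (g c)) S ↔ z ∈ S ∨ ∃ c ∈ cs, z ∈ g c := by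
  intro cs
  induction cs with
  | nil => intro S z; simp
  | cons c t ih =>
    intro S z
    simp only [List.foldl_cons]
    rw [ih]
    rw [PySem.Set.mem_update]
    constructor
    · rintro ((h | h) | ⟨c', hc', hz⟩)
      · exact Or.inl h
      · exact Or.inr ⟨c, List.mem_cons_self, h⟩
      · exact Or.inr ⟨c', List.mem_cons_of_mem _ hc', hz⟩
    · rintro (h | ⟨c', hc', hz⟩)
      · exact Or.inl (Or.inl h)
      · rcases List.mem_cons.1 hc' with rfl | hc''
        · exact Or.inl (Or.inr hz)
        · exact Or.inr ⟨c', hc'', hz⟩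

lemma pv_nodup_foldl_update (g : Int → PySem.Set Int) :
    ∀ (cs : List Int) (S : PySem.Set Int), S.Nodup →
      (cs.foldl (fun S c => PySem.Set.update S (g c)) S).Nodup := by
  intro cs
  induction cs with
  | nil => intro S h; exact h
  | cons c t ih =>
    intro S h
    exact ih _ (PySem.Set.nodup_update _ _ h)

-- the initial comprehension: reach_0[s] is exactly the length-1 walks from s
lemma pvReach0_char (edges : List (Int × Int)) (s z : Int) :
    z ∈ (pvReach0 (pvAdj edges)).getD s [] ↔ pvReachN edges 1 s z := by
  unfold pvReach0
  rw [pv_foldl_insert_getD _ _ _ _ (pvAdj_items_fst_nodup edges)]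
  have h1 : pvReachN edges 1 s z ↔ (s, z) ∈ edges := by
    rw [show (1 : Nat) = 0 + 1 from rfl, pvReachN_succ_iff]
    constructor
    · rintro (h | ⟨c, _, hr⟩)
      · exact h
      · exact absurd hr (pvReachN_zero edges c z)
    · exact Or.inl
  rw [h1]
  rcases hf : (pvAdj edges).items.find? (fun pc => pc.1 == s) with _ | pc
  · simp only [hf, PySem.Dict.getD_empty]
    have hg : (pvAdj edges).get? s = none := by rw [pv_dict_get?_eq_find?, hf]; rfl
    simpa using pvAdj_get?_none_not_mem edges s hg z
  · simp only [hf]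
    have hg : (pvAdj edges).get? s = some pc.2 := by rw [pv_dict_get?_eq_find?, hf]; rfl
    rw [PySem.Set.mem_ofList]
    exact pvAdj_get?_some_mem edges s pc.2 hg z

-- one round: reach[s] gains exactly one more edge of walk length
lemma pvStep_char (edges : List (Int × Int)) (reach : PySem.Dict Int (PySem.Set Int)) (n : Nat)
    (h : ∀ s z, z ∈ reach.getD s [] ↔ pvReachN edges n s z) (s z : Int) :
    z ∈ (pvReachStep (pvAdj edges) reach).getD s [] ↔ pvReachN edges (n + 1) s z := by
  unfold pvReachStep
  rw [pv_foldl_insert_getD _ _ _ _ (pvAdj_items_fst_nodup edges)]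
  rw [pvReachN_succ_iff]
  rcases hf : (pvAdj edges).items.find? (fun pc => pc.1 == s) with _ | pc
  · simp only [hf, PySem.Dict.getD_empty]
    have hg : (pvAdj edges).get? s = none := by rw [pv_dict_get?_eq_find?, hf]; rfl
    have hno := pvAdj_get?_none_not_mem edges s hg
    constructor
    · intro hz; cases hz
    · rintro (hz | ⟨c, hc, _⟩)
      · exact absurd hz (hno z)
      · exact absurd hc (hno c)
  · simp only [hf]
    have hg : (pvAdj edges).get? s = some pc.2 := by rw [pv_dict_get?_eq_find?, hf]; rfl
    have hmem := pvAdj_get?_some_mem edges s pc.2 hg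
    rw [pv_mem_foldl_update]
    rw [PySem.Set.mem_ofList]
    constructor
    · rintro (hz | ⟨c, hc, hzc⟩)
      · exact Or.inl ((hmem z).1 hz)
      · exact Or.inr ⟨c, (hmem c).1 hc, (h c z).1 hzc⟩
    · rintro (hz | ⟨c, hc, hr⟩)
      · exact Or.inl ((hmem z).2 hz)
      · exact Or.inr ⟨c, (hmem c).2 hc, (h c z).2 hr⟩

-- values of every round are genuine sets (Nodup)
lemma pvReachDict_nodup (edges : List (Int × Int)) (reach : PySem.Dict Int (PySem.Set Int))
    (hbuild : reach = pvReach0 (pvAdj edges) ∨ ∃ r, reach = pvReachStep (pvAdj edges) r) (s : Int) :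
    (reach.getD s []).Nodup := by
  have hmain : ∀ (g : Int × List Int → PySem.Set Int), (∀ pc, (g pc).Nodup) →
      (((pvAdj edges).items.foldl (fun d pc => d.insert pc.1 (g pc)) PySem.Dict.empty).getD s []).Nodup := by
    intro g hg
    rw [pv_foldl_insert_getD _ _ _ _ (pvAdj_items_fst_nodup edges)]
    rcases hf : (pvAdj edges).items.find? (fun pc => pc.1 == s) with _ | pc
    · simp only [hf, PySem.Dict.getD_empty]
      exact List.nodup_nil
    · simp only [hf]
      exact hg pc
  rcases hbuild with rfl | ⟨r, rfl⟩
  · exact hmain _ (fun pc => PySem.Set.nodup_ofList _)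
  · exact hmain _ (fun pc => pv_nodup_foldl_update _ _ _ (PySem.Set.nodup_ofList _))

-- the iterated rounds: the final reach dict is bounded reachability
lemma pvReachFinal_char (edges : List (Int × Int)) (s z : Int) :
    z ∈ ((List.range edges.length).foldl (fun r _ => pvReachStep (pvAdj edges) r)
          (pvReach0 (pvAdj edges))).getD s []
      ↔ pvReachN edges (edges.length + 1) s z := by
  have hmain : ∀ (t : Nat) (s z : Int),
      z ∈ ((List.range t).foldl (fun r _ => pvReachStep (pvAdj edges) r)
            (pvReach0 (pvAdj edges))).getD s [] ↔ pvReachN edges (t + 1) s z := by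
    intro t
    induction t with
    | zero => intro s z; simpa using pvReach0_char edges s z
    | succ t ih =>
      intro s z
      rw [List.range_succ, List.foldl_append]
      simp only [List.foldl_cons, List.foldl_nil]
      exact pvStep_char edges _ (t + 1) ih s z
  exact hmain edges.length s z

lemma pvReachFinal_nodup (edges : List (Int × Int)) (s : Int) :
    (((List.range edges.length).foldl (fun r _ => pvReachStep (pvAdj edges) r)
        (pvReach0 (pvAdj edges))).getD s []).Nodup := by
  cases hl : edges.length with
  | zero =>
    exact pvReachDict_nodup edges _ (Or.inl rfl) s
  | succ t =>
    rw [List.range_succ, List.foldl_append]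
    simp only [List.foldl_cons, List.foldl_nil]
    exact pvReachDict_nodup edges _ (Or.inr ⟨_, rfl⟩) s

-- ---------- bfsB (the visited set) is exactly reachability ----------

lemma bfsB_sound (edges : List (Int × Int)) (allv : List Int)
    (hadj : ∀ p y, y ∈ (pvAdj edges).getD p [] → y ∈ allv) (s : Int) :
    ∀ (Q : List Int) (V : PySem.Set Int) (hQ : ∀ x ∈ Q, x ∈ allv),
      (∀ v ∈ V, v = s ∨ pvReachRel edges s v) →
      (∀ q ∈ Q, q = s ∨ pvReachRel edges s q) →
      ∀ z ∈ bfsB (pvAdj edges) allv hadj Q V hQ, z = s ∨ pvReachRel edges s z := by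
  intro Q V hQ
  induction Q, V, hQ using bfsB.induct (pvAdj edges) allv hadj with
  | case1 V hQ hQ' =>
    intro hV _ z hz
    rw [bfsB] at hz
    exact hV z hz
  | case2 V x rest hQ hx hQ' ih =>
    intro hV hQmem z hz
    rw [bfsB] at hz
    simp only [hx, dif_pos] at hz
    exact ih hV (fun q hq => hQmem q (List.mem_cons_of_mem _ hq)) z hz
  | case3 V x rest hQ hx hQ' ih =>
    intro hV hQmem z hz
    rw [bfsB, dif_neg hx] at hz
    have hxr : x = s ∨ pvReachRel edges s x := hQmem x List.mem_cons_self
    refine ih ?_ ?_ z hz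
    · intro v hv
      rcases (PySem.Set.mem_add V x v).1 hv with h | rfl
      · exact hV v h
      · exact hxr
    · intro q hq
      rcases List.mem_append.1 hq with h | h
      · exact hQmem q (List.mem_cons_of_mem _ h)
      · have hqe : (x, q) ∈ edges := (mem_pvAdj edges x q).1 (List.mem_of_mem_filter h)
        rcases hxr with rfl | hr
        · exact Or.inr (pvReach_base edges x q hqe)
        · exact Or.inr (pvReach_snoc edges s x q hr hqe)

lemma bfsB_subQ (adj : PySem.Dict Int (List Int)) (allv : List Int)
    (hadj : ∀ p y, y ∈ adj.getD p [] → y ∈ allv) :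
    ∀ (Q : List Int) (V : PySem.Set Int) (hQ : ∀ x ∈ Q, x ∈ allv),
      ∀ q ∈ Q, q ∈ bfsB adj allv hadj Q V hQ := by
  intro Q V hQ
  induction Q, V, hQ using bfsB.induct adj allv hadj with
  | case1 V hQ hQ' => intro q hq; cases hq
  | case2 V x rest hQ hx hQ' ih =>
    intro q hq
    rw [bfsB]
    simp only [hx, dif_pos]
    rcases List.mem_cons.1 hq with rfl | hq'
    · exact bfsB_mono adj allv hadj rest V _ q ((PySem.Set.contains_iff V q).1 hx)
    · exact ih q hq'
  | case3 V x rest hQ hx hQ' ih =>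
    intro q hq
    rw [bfsB, dif_neg hx]
    rcases List.mem_cons.1 hq with rfl | hq'
    · exact bfsB_mono adj allv hadj _ _ _ q ((PySem.Set.mem_add V q q).2 (Or.inr rfl))
    · exact ih q (List.mem_append.2 (Or.inl hq'))

lemma bfsB_closed (adj : PySem.Dict Int (List Int)) (allv : List Int)
    (hadj : ∀ p y, y ∈ adj.getD p [] → y ∈ allv) :
    ∀ (Q : List Int) (V : PySem.Set Int) (hQ : ∀ x ∈ Q, x ∈ allv),
      (∀ v ∈ V, ∀ c ∈ adj.getD v [], c ∈ V ∨ c ∈ Q) →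
      ∀ y ∈ bfsB adj allv hadj Q V hQ, ∀ c ∈ adj.getD y [], c ∈ bfsB adj allv hadj Q V hQ := by
  intro Q V hQ
  induction Q, V, hQ using bfsB.induct adj allv hadj with
  | case1 V hQ hQ' =>
    intro hinv y hy c hc
    rw [bfsB] at hy ⊢
    rcases hinv y hy c hc with h | h
    · exact h
    · cases h
  | case2 V x rest hQ hx hQ' ih =>
    intro hinv y hy c hc
    rw [bfsB] at hy ⊢
    simp only [hx, dif_pos] at hy ⊢
    refine ih ?_ y hy c hc
    intro v hv c' hc'
    rcases hinv v hv c' hc' with h | h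
    · exact Or.inl h
    · rcases List.mem_cons.1 h with rfl | h'
      · exact Or.inl ((PySem.Set.contains_iff V c').1 hx)
      · exact Or.inr h'
  | case3 V x rest hQ hx hQ' ih =>
    intro hinv y hy c hc
    rw [bfsB, dif_neg hx] at hy ⊢
    refine ih ?_ y hy c hc
    intro v hv c' hc'
    rcases (PySem.Set.mem_add V x v).1 hv with hvV | rfl
    · rcases hinv v hvV c' hc' with h | h
      · exact Or.inl ((PySem.Set.mem_add V x c').2 (Or.inl h))
      · rcases List.mem_cons.1 h with rfl | h'
        · exact Or.inl ((PySem.Set.mem_add V c' c').2 (Or.inr rfl))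
        · exact Or.inr (List.mem_append.2 (Or.inl h'))
    · by_cases hcV : (PySem.Set.add V v).contains c' = true
      · exact Or.inl ((PySem.Set.contains_iff _ c').1 hcV)
      · refine Or.inr (List.mem_append.2 (Or.inr ?_))
        refine List.mem_filter.2 ⟨hc', ?_⟩
        rw [eq_false_of_ne_true hcV]
        rfl

lemma pv_reach_closed (edges : List (Int × Int)) (R : List Int)
    (hcl : ∀ y ∈ R, ∀ c ∈ (pvAdj edges).getD y [], c ∈ R) :
    ∀ (ms : List Int) (a b : Int), pvWalk edges (a :: ms ++ [b]) → a ∈ R → b ∈ R := by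
  intro ms
  induction ms with
  | nil =>
    intro a b w ha
    exact hcl a ha b ((mem_pvAdj edges a b).2 w.1)
  | cons c ms' ih =>
    intro a b w ha
    have hc : c ∈ R := hcl a ha c ((mem_pvAdj edges a c).2 w.1)
    exact ih c b w.2 hc

-- the visited set of the BFS from s is {s} ∪ the nodes reachable from s
lemma bfsB_char (edges : List (Int × Int)) (allv : List Int)
    (hadj : ∀ p y, y ∈ (pvAdj edges).getD p [] → y ∈ allv) (s : Int)
    (hQ : ∀ x ∈ [s], x ∈ allv) (z : Int) :
    z ∈ bfsB (pvAdj edges) allv hadj [s] PySem.Set.empty hQ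
      ↔ z = s ∨ pvReachRel edges s z := by
  constructor
  · intro hz
    refine bfsB_sound edges allv hadj s [s] PySem.Set.empty hQ ?_ ?_ z hz
    · intro v hv; cases hv
    · intro q hq
      rw [List.mem_singleton] at hq
      exact Or.inl hq
  · have hsR : s ∈ bfsB (pvAdj edges) allv hadj [s] PySem.Set.empty hQ :=
      bfsB_subQ (pvAdj edges) allv hadj [s] PySem.Set.empty hQ s List.mem_cons_self
    rintro (rfl | ⟨ms, w⟩)
    · exact hsR
    · have hclosed := bfsB_closed (pvAdj edges) allv hadj [s] PySem.Set.empty hQ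
        (by intro v hv; cases hv)
      exact pv_reach_closed edges _ hclosed ms s z w hsR

-- per-source: the visited-set bumps = the reach[s] bumps
lemma pvPhase2StepB (edges : List (Int × Int)) (allv : List Int)
    (hadj : ∀ p y, y ∈ (pvAdj edges).getD p [] → y ∈ allv) (s : Int)
    (hQ : ∀ x ∈ [s], x ∈ allv) (l : List (List Int)) :
    (bfsB (pvAdj edges) allv hadj [s] PySem.Set.empty hQ).foldl
        (fun rows d => if d != s && !(PySem.Set.ofList ((pvAdj edges).getD s [])).contains d
          then pvBump (pvBump rows s 2) d 3 else rows) l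
      = (((List.range edges.length).foldl (fun r _ => pvReachStep (pvAdj edges) r)
            (pvReach0 (pvAdj edges))).getD s []).foldl
        (fun rows d => if d != s && !(PySem.Set.ofList ((pvAdj edges).getD s [])).contains d
          then pvBump (pvBump rows s 2) d 3 else rows) l := by
  rw [PySem.List.foldl_if_eq_foldl_filter
      (fun d => d != s && !(PySem.Set.ofList ((pvAdj edges).getD s [])).contains d)
      (fun rows d => pvBump (pvBump rows s 2) d 3),
    PySem.List.foldl_if_eq_foldl_filter
      (fun d => d != s && !(PySem.Set.ofList ((pvAdj edges).getD s [])).contains d)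
      (fun rows d => pvBump (pvBump rows s 2) d 3)]
  refine List.Perm.foldl_eq' ?_ (fun x _ y _ z => pvBump4_comm z s x s y 2 3 2 3) l
  refine (List.perm_ext_iff_of_nodup
      (List.Nodup.filter _ (bfsB_nodup (pvAdj edges) allv hadj [s] PySem.Set.empty hQ List.nodup_nil))
      (List.Nodup.filter _ (pvReachFinal_nodup edges s))).2 ?_
  intro z
  rw [List.mem_filter, List.mem_filter]
  constructor
  · rintro ⟨hz, hcond⟩
    have hzne : z ≠ s := by
      have hcond' := hcond
      simp only [Bool.and_eq_true, bne_iff_ne] at hcond'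
      exact hcond'.1
    rcases (bfsB_char edges allv hadj s hQ z).1 hz with rfl | hr
    · exact absurd rfl hzne
    · refine ⟨?_, hcond⟩
      rw [pvReachFinal_char]
      exact (pvReach_iff_reachN edges s z).1 hr
  · rintro ⟨hz, hcond⟩
    refine ⟨?_, hcond⟩
    rw [pvReachFinal_char] at hz
    exact (bfsB_char edges allv hadj s hQ z).2
      (Or.inr ((pvReach_iff_reachN edges s z).2 hz))

-- the whole per-source loop, A-shape = B-shape
lemma pvPhase2All (edges : List (Int × Int)) (node_count : Int) (init : List (List Int)) :
    (PySem.List.pyRange 1 (node_count + 1)).foldl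
        (fun l node =>
          bfsA (pvAdj edges) (node :: edges.map Prod.snd)
            (fun p y hy => List.mem_cons_of_mem _ (pvAdj_child_mem edges p y hy)) node
            [(node, 0)] PySem.Set.empty l
            (by intro e he; rw [List.mem_singleton] at he; subst he; exact List.mem_cons_self)) init
      = (PySem.List.pyRange 1 (node_count + 1)).foldl
          (fun rows s =>
            ((((List.range edges.length).foldl (fun r _ => pvReachStep (pvAdj edges) r)
                (pvReach0 (pvAdj edges))).getD s [])).foldl
              (fun rows d =>
                if d != s && !(PySem.Set.ofList ((pvAdj edges).getD s [])).contains d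
                then pvBump (pvBump rows s 2) d 3 else rows)
              rows) init := by
  apply PySem.List.foldl_congr_mem
  intro acc x _
  rw [pvPhase2Step (pvAdj edges) (x :: edges.map Prod.snd)
    (fun p y hy => List.mem_cons_of_mem _ (pvAdj_child_mem edges p y hy)) x _
    (by intro z hz; rw [List.mem_singleton] at hz; subst hz; exact List.mem_cons_self) acc]
  exact pvPhase2StepB edges (x :: edges.map Prod.snd)
    (fun p y hy => List.mem_cons_of_mem _ (pvAdj_child_mem edges p y hy)) x _ acc

-- per-node equality of the sibling row update
lemma pvPhase3Step (edges : List (Int × Int)) (node : Int) (l : List (List Int)) :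
    l.modify (node - 1).toNat
        (fun row => row.set 4
          (((PySem.Set.discard
              ((((pvRadj edges).getD node [])).foldl
                (fun S p => PySem.Set.update S ((pvAdj edges).getD p [])) PySem.Set.empty)
              node).length : Int)))
      = l.modify (node - 1).toNat
          (fun row => row.set 4
            (if ((pvRadj edges).getD node []).isEmpty then 0
             else ((PySem.Set.ofList (((pvRadj edges).getD node []).flatMap
                      (fun p => (pvAdj edges).getD p []))).length : Int) - 1)) := by
  rw [pvPhase3Val edges node]

theorem pv_main (edges : List (Int × Int)) (node_count : Int) :
    calculate_relationships edges node_count = calculate_relationships_alt edges node_count := by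
  simp only [calculate_relationships, calculate_relationships_alt, pvScan_fst, pvScan_snd, pvScan_rows]
  rw [pvPhase1]
  rw [pvPhase2All edges node_count]
  apply PySem.List.foldl_congr_mem
  intro acc x _
  exact pvPhase3Step edges x acc

-- ===== VERDICT (by name: the statement is the Claim_ definition above) =====
theorem calculate_relationships_spec : Claim_equal_calculate_relationships := by
  intro edges node_count _ _
  unfold Spec_calculate_relationships
  exact pv_main edges node_count
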